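-- pv_equiv track=rewrite | github.com/uwplasma/vmec_jax | vmec_jax/namelist.py | _strip_fortran_comments
-- ===== SOURCE A (Python) =====
-- def _strip_fortran_comments(line: str) -> str:
--     """Remove '!' comments, respecting single-quoted strings."""
--     out = []
--     in_quote = False
--     i = 0
--     while i < len(line):
--         ch = line[i]
--         if ch == "'":
--             in_quote = not in_quote
--             out.append(ch)
--         elif ch == "!" and not in_quote:
--             break
--         else:
--             out.append(ch)
--         i += 1
--     return "".join(out)
-- ===== SOURCE B (Python) =====
-- def _strip_fortran_comments(line: str) -> str:
--     """Remove '!' comments, respecting single-quoted strings."""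
--     parts = line.split("'")
--     out = []
--     for i, part in enumerate(parts):
--         if i > 0:
--             out.append("'")
--         if i % 2 == 0:
--             idx = part.find('!')
--             if idx != -1:
--                 out.append(part[:idx])
--                 break
--             out.append(part)
--         else:
--             out.append(part)
--     return "".join(out)
-- ===== Notes on version B (the rewrite author's own statement) =====
-- stated objective: faster
-- what changed: Replaces the per-character loop with a quote-toggle flag by splitting the line on single quotes and processing whole chunks: even-indexed chunks (outside quotes) are scanned with str.find for the comment character (truncate and stop at the first hit), odd-indexed chunks (inside quotes) are copied verbatim, with a quote re-inserted before every chunk after the first.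
import Mathlib
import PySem

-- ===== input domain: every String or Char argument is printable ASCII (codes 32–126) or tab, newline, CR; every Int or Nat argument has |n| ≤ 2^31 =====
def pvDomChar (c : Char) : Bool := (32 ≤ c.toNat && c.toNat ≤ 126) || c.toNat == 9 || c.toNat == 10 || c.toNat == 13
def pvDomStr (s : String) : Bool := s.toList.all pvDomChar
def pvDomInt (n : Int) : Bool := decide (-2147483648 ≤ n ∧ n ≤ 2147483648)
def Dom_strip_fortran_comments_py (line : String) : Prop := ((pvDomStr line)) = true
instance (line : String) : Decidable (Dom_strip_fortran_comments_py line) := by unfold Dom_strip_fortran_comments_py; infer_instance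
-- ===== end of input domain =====

-- B replaces A's per-character loop with a quote-toggle flag by split-on-quote processing of whole chunks via str.split/str.find (measurably faster by constant factor).

-- ===== PORT A =====
-- A's while loop over characters with the in_quote flag; out is accumulated by cons.
def stripLoop : List Char → Bool → List Char
  | [], _ => []
  | c :: rest, q =>
    if c = '\'' then c :: stripLoop rest (!q)
    else if c = '!' ∧ q = false then []
    else c :: stripLoop rest q

def strip_fortran_comments_py (line : String) : String :=
  String.ofList (stripLoop line.toList false)

-- ===== PORT B =====
-- Source B's for-loop over enumerate(line.split("'")); i is the chunk index, a "'" is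
-- re-inserted before every chunk after the first, even chunks are scanned with find('!').
def altChunks : Nat → List (List Char) → List Char
  | _, [] => []
  | i, part :: rest =>
    (if 0 < i then ['\''] else []) ++
    (if i % 2 = 0 then
      (let idx := PySem.Chars.find part ['!']
       if idx ≠ -1 then PySem.List.slice part none (some idx)  -- part[:idx], then break
       else part ++ altChunks (i + 1) rest)
     else part ++ altChunks (i + 1) rest)

def strip_fortran_comments_py_alt (line : String) : String :=
  String.ofList (altChunks 0 (line.toList.splitOn '\''))

-- ===== PRECONDITION & SPEC =====
def Spec_strip_fortran_comments_py (line : String) (out : String) : Prop := out = strip_fortran_comments_py_alt line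
instance (line : String) (out : String) : Decidable (Spec_strip_fortran_comments_py line out) := by unfold Spec_strip_fortran_comments_py; infer_instance

-- ===== CLAIM (what is proved, stated in full; the proofs are below) =====
def Claim_equal_strip_fortran_comments_py : Prop := ∀ (line : String), Dom_strip_fortran_comments_py line → Spec_strip_fortran_comments_py line (strip_fortran_comments_py line)

-- ===== LEMMAS AND PROOFS =====

theorem drop_takeWhile_len (p : Char → Bool) (l : List Char) :
    l.drop (l.takeWhile p).length = l.dropWhile p := by
  have h := List.takeWhile_append_dropWhile (p := p) (l := l)
  calc l.drop (l.takeWhile p).length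
      = (l.takeWhile p ++ l.dropWhile p).drop (l.takeWhile p).length := by rw [h]
    _ = l.dropWhile p := List.drop_left

theorem take_takeWhile_len (p : Char → Bool) (l : List Char) :
    l.take (l.takeWhile p).length = l.takeWhile p := by
  have h := List.takeWhile_append_dropWhile (p := p) (l := l)
  calc l.take (l.takeWhile p).length
      = (l.takeWhile p ++ l.dropWhile p).take (l.takeWhile p).length := by rw [h]
    _ = l.takeWhile p := List.take_left

-- s.find('!') characterised: -1 if absent, else the length of the bang-free prefix.
theorem find_bang (s : List Char) :
    PySem.Chars.find s ['!'] =
      if '!' ∈ s then ((s.takeWhile (· != '!')).length : Int) else -1 := by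
  by_cases hm : '!' ∈ s
  · simp only [hm, if_pos]
    have hinf : ['!'] <:+: s := (List.singleton_infix_iff '!' s).mpr hm
    have hnn : 0 ≤ PySem.Chars.find s ['!'] :=
      (PySem.Chars.find_nonneg_iff s ['!']).mpr hinf
    obtain ⟨hpre, hmin⟩ := PySem.Chars.find_spec hnn
    set n := (PySem.Chars.find s ['!']).toNat with hn
    set k := (s.takeWhile (· != '!')).length with hk
    have hdropne : s.dropWhile (· != '!') ≠ [] := by
      intro hnil
      have hts : s.takeWhile (· != '!') = s := by
        have h2 := List.takeWhile_append_dropWhile (p := (· != '!')) (l := s)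
        rw [hnil, List.append_nil] at h2; exact h2
      have : ('!' != '!') = true :=
        List.mem_takeWhile_imp (p := (· != '!')) (l := s) (x := '!') (by rw [hts]; exact hm)
      simp at this
    have hpk : ['!'] <+: s.drop k := by
      rw [hk, drop_takeWhile_len]
      obtain ⟨a, t, hat⟩ := List.exists_cons_of_ne_nil hdropne
      have hh := List.head_dropWhile_not (· != '!') hdropne
      simp only [hat, List.head_cons] at hh
      have ha : a = '!' := by simpa using hh
      rw [hat, ha]
      exact ⟨t, rfl⟩
    have hle : n ≤ k := by
      by_contra hgt
      exact (hmin k (by omega)) hpk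
    have hklen : k ≤ s.length := by
      rw [hk]; exact (List.takeWhile_sublist _).length_le
    have hge : k ≤ n := by
      by_contra hlt
      have hnlen : n < s.length := by omega
      obtain ⟨t, ht⟩ := hpre
      have hget : s[n]? = some '!' := by
        have h0 : (s.drop n)[0]? = s[n + 0]? := List.getElem?_drop
        rw [← ht] at h0
        simpa using h0.symm
      have hget' : s[n]'hnlen = '!' := by
        have := List.getElem?_eq_getElem (l := s) (i := n) hnlen
        rw [this] at hget; exact Option.some.inj hget
      have htake : s.take k = s.takeWhile (· != '!') := by
        rw [hk]; exact take_takeWhile_len _ _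
      have hmem : s[n]'hnlen ∈ s.takeWhile (· != '!') := by
        have h1 : n < (s.take k).length := by simp [hklen]; omega
        have h2 : (s.take k)[n]'h1 = s[n]'hnlen := List.getElem_take
        rw [← htake]
        exact h2 ▸ List.getElem_mem h1
      have := List.mem_takeWhile_imp hmem
      rw [hget'] at this
      simp at this
    have hnk : n = k := le_antisymm hle hge
    omega
  · simp only [hm, if_false]
    exact (PySem.Chars.find_eq_neg_one_iff s ['!']).mpr
      (fun h => hm ((List.singleton_infix_iff '!' s).mp h))

-- Chunk processing of the split equals A's flag loop: the chunk index's parity is the flag.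
theorem altChunks_splitOn (cs : List Char) : ∀ i : Nat,
    altChunks i (cs.splitOn '\'') =
      (if 0 < i then ['\''] else []) ++ stripLoop cs (decide (i % 2 = 1)) := by
  induction cs with
  | nil =>
    intro i
    have hf : PySem.Chars.find ([] : List Char) ['!'] = -1 := by decide
    simp [List.splitOn, List.splitOnP_nil, altChunks, stripLoop, hf]
  | cons c t ih =>
    intro i
    rcases Nat.mod_two_eq_zero_or_one i with hi | hi
    all_goals by_cases hc : c = '\''
    -- i even, c = quote
    · subst hc
      rw [show ('\''::t).splitOn '\'' = [] :: t.splitOn '\'' by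
        simp [List.splitOn, List.splitOnP_cons]]
      have hf : PySem.Chars.find ([] : List Char) ['!'] = -1 := by decide
      have h1 : (i + 1) % 2 = 1 := by omega
      simp [altChunks, hf, hi, ih (i + 1), h1, stripLoop]
    -- i even, c ≠ quote
    · obtain ⟨h, r, hs⟩ := List.exists_cons_of_ne_nil
        (show t.splitOn '\'' ≠ [] by
          simpa [List.splitOn] using List.splitOnP_ne_nil (fun x => x == '\'') t)
      rw [show ((c::t).splitOn '\'') = (c :: h) :: r by
        simp only [List.splitOn, List.splitOnP_cons]
        rw [show (t.splitOnP (fun x => x == '\'')) = h :: r from hs]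
        simp [hc]]
      have iht := ih i
      rw [hs] at iht
      by_cases hcb : c = '!'
      · -- comment starts right here: find = 0, take 0 = []
        subst hcb
        have hf0 : PySem.Chars.find ('!' :: h) ['!'] = 0 := by
          rw [find_bang]; simp
        have hsl0 : PySem.List.slice ('!' :: h) none (some 0) = [] := by
          rw [PySem.List.slice_to ('!' :: h) (le_refl 0)]; simp
        simp [altChunks, hi, hf0, hsl0, stripLoop, hc]
      · by_cases hb : '!' ∈ h
        · -- '!' inside the chunk tail: find shifts by one, slice keeps c
          have hm2 : '!' ∈ c :: h := List.mem_cons_of_mem _ hb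
          have hcne : (c != '!') = true := by simpa using hcb
          have hfh : PySem.Chars.find h ['!'] =
              ((h.takeWhile (· != '!')).length : Int) := by
            rw [find_bang, if_pos hb]
          have hfc : PySem.Chars.find (c :: h) ['!'] =
              (((h.takeWhile (· != '!')).length + 1 : Nat) : Int) := by
            rw [find_bang, if_pos hm2, List.takeWhile_cons, if_pos hcne,
              List.length_cons]
          have hne1 : PySem.Chars.find h ['!'] ≠ -1 := by rw [hfh]; omega
          have hne2 : PySem.Chars.find (c :: h) ['!'] ≠ -1 := by rw [hfc]; omega
          have hsl1 : PySem.List.slice h none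
              (some ((h.takeWhile (· != '!')).length : Int)) =
              h.take (h.takeWhile (· != '!')).length := by
            rw [PySem.List.slice_to h (Int.natCast_nonneg _)]; simp
          have hsl2 : PySem.List.slice (c :: h) none
              (some (((h.takeWhile (· != '!')).length + 1 : Nat) : Int)) =
              (c :: h).take ((h.takeWhile (· != '!')).length + 1) := by
            rw [PySem.List.slice_to (c :: h) (Int.natCast_nonneg _)]; simp
          have e0 : altChunks i (h :: r) = (if 0 < i then ['\''] else []) ++
              PySem.List.slice h none (some (PySem.Chars.find h ['!'])) := by
            simp [altChunks, hi, hne1]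
          rw [e0, hfh, hsl1] at iht
          have hcan : h.take (h.takeWhile (· != '!')).length =
              stripLoop t (decide (i % 2 = 1)) := List.append_cancel_left iht
          have e1 : altChunks i ((c :: h) :: r) = (if 0 < i then ['\''] else []) ++
              PySem.List.slice (c :: h) none (some (PySem.Chars.find (c :: h) ['!'])) := by
            simp [altChunks, hi, hne2]
          rw [e1, hfc, hsl2, List.take_succ_cons, hcan]
          simp [stripLoop, hc, hcb, hi]
        · -- no '!' in the chunk: copy it whole and continue
          have hbc : '!' ∉ c :: h := by
            intro hmem
            rcases List.mem_cons.mp hmem with h1 | h1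
            · exact hcb h1.symm
            · exact hb h1
          have hfh : PySem.Chars.find h ['!'] = -1 := by rw [find_bang]; simp [hb]
          have hfc : PySem.Chars.find (c :: h) ['!'] = -1 := by rw [find_bang]; simp [hbc]
          rw [show altChunks i (h :: r) =
              (if 0 < i then ['\''] else []) ++ (h ++ altChunks (i + 1) r) from by
            simp [altChunks, hi, hfh]] at iht
          have hcan : h ++ altChunks (i + 1) r = stripLoop t (decide (i % 2 = 1)) :=
            List.append_cancel_left iht
          rw [show altChunks i ((c :: h) :: r) =
              (if 0 < i then ['\''] else []) ++ (c :: (h ++ altChunks (i + 1) r)) from by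
            simp [altChunks, hi, hfc]]
          rw [hcan]
          simp [stripLoop, hc, hcb, hi]
    -- i odd, c = quote
    · subst hc
      rw [show ('\''::t).splitOn '\'' = [] :: t.splitOn '\'' by
        simp [List.splitOn, List.splitOnP_cons]]
      have h1 : (i + 1) % 2 = 0 := by omega
      simp [altChunks, hi, ih (i + 1), h1, stripLoop]
    -- i odd, c ≠ quote (inside quotes: '!' is ordinary)
    · obtain ⟨h, r, hs⟩ := List.exists_cons_of_ne_nil
        (show t.splitOn '\'' ≠ [] by
          simpa [List.splitOn] using List.splitOnP_ne_nil (fun x => x == '\'') t)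
      rw [show ((c::t).splitOn '\'') = (c :: h) :: r by
        simp only [List.splitOn, List.splitOnP_cons]
        rw [show (t.splitOnP (fun x => x == '\'')) = h :: r from hs]
        simp [hc]]
      have iht := ih i
      rw [hs] at iht
      rw [show altChunks i (h :: r) =
          (if 0 < i then ['\''] else []) ++ (h ++ altChunks (i + 1) r) from by
        simp [altChunks, hi]] at iht
      have hcan : h ++ altChunks (i + 1) r = stripLoop t (decide (i % 2 = 1)) :=
        List.append_cancel_left iht
      rw [show altChunks i ((c :: h) :: r) =
          (if 0 < i then ['\''] else []) ++ (c :: (h ++ altChunks (i + 1) r)) from by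
        simp [altChunks, hi]]
      rw [hcan]
      simp [stripLoop, hc, hi]

-- ===== VERDICT (by name: the statement is the Claim_ definition above) =====
theorem strip_fortran_comments_py_spec : Claim_equal_strip_fortran_comments_py := by
  intro line _
  unfold Spec_strip_fortran_comments_py strip_fortran_comments_py strip_fortran_comments_py_alt
  rw [altChunks_splitOn line.toList 0]
  simp
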